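-- pv_equiv track=rewrite | github.com/meredithbloom/advent-of-code-2023 | day-4/day-4.py | compare_nums
-- ===== SOURCE A (Python) =====
-- def compare_nums(nums):
--     left, right = nums.split('|')[0].strip(), nums.split('|')[1].strip()
--     left_nums = {int(x) for x in left.split()}
--     right_nums = {int(x) for x in right.split()}
--     overlap = left_nums.intersection(right_nums)
--     if (len(overlap) > 0):
--         return(calc_points(overlap))
--     else:
--         return 0
--
-- def calc_points(num_intersection):
--     if (len(num_intersection) == 1):
--         return 2**0
--     elif (len(num_intersection) > 1):
--         return 2**(len(num_intersection)-1)
-- ===== SOURCE B (Python) =====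
-- def compare_nums(nums):
--     parts = nums.split('|')
--     left_vals = [int(x) for x in parts[0].split()]
--     right_vals = [int(x) for x in parts[1].split()]
--     points = 0
--     for w in dict.fromkeys(left_vals):  # distinct left numbers, first-seen order
--         if w in right_vals:
--             points = points + points if points else 1
--     return points
-- ===== Notes on version B (the rewrite author's own statement) =====
-- stated objective: alternative
-- what changed: Replaces A's set-intersection plus closed-form 2**(len-1) scoring with a single dedup-then-scan pass that builds the score by iterative doubling (0->1->2->4...) over the distinct left numbers found in the right list.
import Mathlib
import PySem

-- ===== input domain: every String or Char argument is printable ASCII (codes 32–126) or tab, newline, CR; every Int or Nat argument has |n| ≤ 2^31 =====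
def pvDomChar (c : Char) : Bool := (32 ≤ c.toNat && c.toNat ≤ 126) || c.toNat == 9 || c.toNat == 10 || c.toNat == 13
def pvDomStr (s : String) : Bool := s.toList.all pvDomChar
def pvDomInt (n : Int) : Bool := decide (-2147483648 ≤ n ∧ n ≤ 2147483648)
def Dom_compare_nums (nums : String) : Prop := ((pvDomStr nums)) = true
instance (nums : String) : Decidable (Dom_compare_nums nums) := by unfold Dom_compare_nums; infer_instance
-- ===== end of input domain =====

-- B replaces A's set intersection + closed-form 2**(len-1) score by one dedup-then-scan
-- pass that doubles an accumulator per match (objective: alternative decomposition).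

-- shared parsing helper: int(x) for every token, none = first ValueError
def pvParse? (ts : List String) : Option (List Int) := ts.mapM PySem.Int.ofStr?

-- ===== PORT A =====
-- calc_points; the final 0 stands for Python's None on an empty set, unreachable
-- because A only calls it with len(overlap) > 0
def pvCalcPoints (ov : PySem.Set Int) : Int :=
  if PySem.Set.len ov = 1 then 2 ^ (0 : Nat)
  else if PySem.Set.len ov > 1 then 2 ^ (PySem.Set.len ov - 1).toNat
  else 0

def compare_nums (nums : String) : Int :=
  let parts := (PySem.Str.split? nums "|").getD []   -- sep "|" ≠ "", never none
  match PySem.List.pyGet? parts 0, PySem.List.pyGet? parts 1 with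
  | some l0, some l1 =>
    let left := PySem.Str.strip l0
    let right := PySem.Str.strip l1
    match pvParse? (PySem.Str.split₀ left), pvParse? (PySem.Str.split₀ right) with
    | some ls, some rs =>
      let left_nums : PySem.Set Int := PySem.Set.ofList ls
      let right_nums : PySem.Set Int := PySem.Set.ofList rs
      let overlap := PySem.Set.inter left_nums right_nums
      if PySem.Set.len overlap > 0 then pvCalcPoints overlap else 0
    | _, _ => 0   -- int() raised: outside Pre_
  | _, _ => 0     -- IndexError (no '|'): outside Pre_

-- ===== PORT B =====
def compare_nums_alt (nums : String) : Int :=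
  let parts := (PySem.Str.split? nums "|").getD []
  match PySem.List.pyGet? parts 0 with
  | none => 0
  | some l0 =>
    match PySem.List.pyGet? parts 1 with
    | none => 0
    | some l1 =>
      match pvParse? (PySem.Str.split₀ l0) with
      | none => 0
      | some left_vals =>
        match pvParse? (PySem.Str.split₀ l1) with
        | none => 0
        | some right_vals =>
          (PySem.List.dedup left_vals).foldl
            (fun points w =>
              if right_vals.contains w then (if points = 0 then 1 else points + points)
              else points) 0

-- ===== PRECONDITION & SPEC =====
-- Pre_ excludes exactly the inputs where Python A raises: the pipe separator occurring
-- fewer than once, so there is no second part (IndexError), or a token on either side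
-- that int() rejects (ValueError).
def Pre_compare_nums (nums : String) : Prop :=
  let parts := (PySem.Str.split? nums "|").getD []
  2 ≤ parts.length ∧
  (∀ t ∈ PySem.Str.split₀ ((PySem.List.pyGet? parts 0).getD ""), (PySem.Int.ofStr? t).isSome = true) ∧
  (∀ t ∈ PySem.Str.split₀ ((PySem.List.pyGet? parts 1).getD ""), (PySem.Int.ofStr? t).isSome = true)
instance (nums : String) : Decidable (Pre_compare_nums nums) := by unfold Pre_compare_nums; infer_instance

def pvWitness_compare_nums : String := "41 48 83 86 17 | 83 86 6 31 17 9 48 53"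

def Spec_compare_nums (nums : String) (out : Int) : Prop := out = compare_nums_alt nums
instance (nums : String) (out : Int) : Decidable (Spec_compare_nums nums out) := by unfold Spec_compare_nums; infer_instance

-- ===== CLAIM (what is proved, stated in full; the proofs are below) =====
def Claim_equal_compare_nums : Prop := ∀ (nums : String), Dom_compare_nums nums → Pre_compare_nums nums → Spec_compare_nums nums (compare_nums nums)

-- ===== LEMMAS AND PROOFS =====

-- score after k matches
def pvSc (k : Nat) : Int := if k = 0 then 0 else 2 ^ (k - 1)

theorem pvSc_ne_zero (k : Nat) (h : k ≠ 0) : pvSc k ≠ 0 := by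
  simp only [pvSc, if_neg h]
  positivity

theorem pvSc_succ (k : Nat) : (if pvSc k = 0 then (1:Int) else pvSc k + pvSc k) = pvSc (k + 1) := by
  rcases Nat.eq_zero_or_pos k with hk | hk
  · subst hk; simp [pvSc]
  · have hne := pvSc_ne_zero k (by omega)
    rw [if_neg hne]
    simp only [pvSc, if_neg (by omega : ¬ k = 0), if_neg (by omega : ¬ k + 1 = 0),
      Nat.add_sub_cancel]
    rw [← two_mul, ← pow_succ']
    congr 1
    omega

theorem pvFold (pred : Int → Bool) (l : List Int) : ∀ (k : Nat),
    l.foldl (fun p w => if pred w then (if p = 0 then 1 else p + p) else p) (pvSc k)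
      = pvSc (k + l.countP pred) := by
  induction l with
  | nil => intro k; simp
  | cons w l ih =>
    intro k
    by_cases hw : pred w
    · rw [List.foldl_cons, if_pos hw, pvSc_succ, ih (k + 1), List.countP_cons]
      simp only [hw, if_true]
      congr 1
      omega
    · rw [List.foldl_cons, if_neg hw, ih k, List.countP_cons]
      simp [hw]

-- split() ignores leading whitespace: split₀.go on a left-stripped string
theorem pv_go_lstrip (s : List Char) (acc : List (List Char)) :
    PySem.Chars.split₀.go s [] acc
      = PySem.Chars.split₀.go (s.dropWhile PySem.Chars.isspace) [] acc := by
  induction s generalizing acc with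
  | nil => rfl
  | cons c rest ih =>
    by_cases hc : PySem.Chars.isspace c
    · rw [PySem.Chars.split₀.go, List.dropWhile_cons_of_pos hc]
      simp only [hc, List.isEmpty_nil, if_true]
      exact ih acc
    · rw [List.dropWhile_cons_of_neg hc]

-- split₀.go on an all-whitespace string just flushes the current word
theorem pv_go_allspace (ws : List Char) (h : ∀ c ∈ ws, PySem.Chars.isspace c = true)
    (cur : List Char) (acc : List (List Char)) :
    PySem.Chars.split₀.go ws cur acc = PySem.Chars.split₀.go [] cur acc := by
  induction ws generalizing cur acc with
  | nil => rfl
  | cons c rest ih =>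
    have hc : PySem.Chars.isspace c = true := h c (by simp)
    have hrest : ∀ c ∈ rest, PySem.Chars.isspace c = true := fun c hm => h c (by simp [hm])
    simp only [PySem.Chars.split₀.go, hc, if_true]
    by_cases hcur : cur.isEmpty
    · rw [if_pos hcur, if_pos hcur, ih hrest]
      rfl
    · rw [if_neg hcur, if_neg hcur, ih hrest]
      rfl

-- trailing whitespace does not change split₀.go
theorem pv_go_append_space (s ws : List Char) (h : ∀ c ∈ ws, PySem.Chars.isspace c = true) :
    ∀ (cur : List Char) (acc : List (List Char)),
    PySem.Chars.split₀.go (s ++ ws) cur acc = PySem.Chars.split₀.go s cur acc := by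
  induction s with
  | nil => intro cur acc; simpa using pv_go_allspace ws h cur acc
  | cons c rest ih =>
    intro cur acc
    rw [List.cons_append, PySem.Chars.split₀.go, PySem.Chars.split₀.go]
    by_cases hc : PySem.Chars.isspace c
    · simp only [hc, if_true]
      by_cases hcur : cur.isEmpty
      · rw [if_pos hcur, if_pos hcur, ih]
      · rw [if_neg hcur, if_neg hcur, ih]
    · simp only [hc, if_false, Bool.false_eq_true]
      exact ih _ _

theorem pv_split₀_strip (s : List Char) :
    PySem.Chars.split₀ (PySem.Chars.strip s) = PySem.Chars.split₀ s := by
  unfold PySem.Chars.strip PySem.Chars.rstrip PySem.Chars.lstrip PySem.Chars.split₀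
  set t := s.dropWhile PySem.Chars.isspace with ht
  have hdec : (t.reverse.dropWhile PySem.Chars.isspace).reverse
      ++ (t.reverse.takeWhile PySem.Chars.isspace).reverse = t := by
    rw [← List.reverse_append, List.takeWhile_append_dropWhile, List.reverse_reverse]
  have hsp : ∀ c ∈ (t.reverse.takeWhile PySem.Chars.isspace).reverse,
      PySem.Chars.isspace c = true := by
    intro c hc
    exact List.mem_takeWhile_imp (List.mem_reverse.mp hc)
  calc PySem.Chars.split₀.go (t.reverse.dropWhile PySem.Chars.isspace).reverse [] []
      = PySem.Chars.split₀.go ((t.reverse.dropWhile PySem.Chars.isspace).reverse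
          ++ (t.reverse.takeWhile PySem.Chars.isspace).reverse) [] [] :=
        (pv_go_append_space _ _ hsp [] []).symm
    _ = PySem.Chars.split₀.go t [] [] := by rw [hdec]
    _ = PySem.Chars.split₀.go s [] [] := by rw [ht, ← pv_go_lstrip]

theorem pv_str_split₀_strip (s : String) :
    PySem.Str.split₀ (PySem.Str.strip s) = PySem.Str.split₀ s := by
  have h : List.map String.toList (PySem.Str.split₀ (PySem.Str.strip s))
      = List.map String.toList (PySem.Str.split₀ s) := by
    rw [PySem.Str.split₀_map_toList, PySem.Str.split₀_map_toList, PySem.Str.toList_strip,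
      pv_split₀_strip]
  exact List.map_injective_iff.mpr (fun a b hab => by
    simpa using congrArg String.ofList hab) h

-- all tokens parse → pvParse? returns some
theorem pv_parse_isSome (ts : List String) (h : ∀ t ∈ ts, (PySem.Int.ofStr? t).isSome = true) :
    ∃ vs, pvParse? ts = some vs := by
  induction ts with
  | nil => exact ⟨[], rfl⟩
  | cons t ts ih =>
    obtain ⟨v, hv⟩ := Option.isSome_iff_exists.mp (h t (by simp))
    obtain ⟨vs, hvs⟩ := ih (fun u hu => h u (by simp [hu]))
    refine ⟨v :: vs, ?_⟩
    unfold pvParse? at hvs ⊢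
    rw [List.mapM_cons, hv, hvs]
    rfl

-- the two membership predicates agree
theorem pv_contains_ofList (rs : List Int) (x : Int) :
    (PySem.Set.ofList rs).contains x = rs.contains x := by
  by_cases hx : x ∈ rs
  · simp [PySem.Set.mem_ofList, hx]
  · simp [PySem.Set.mem_ofList, hx]

theorem pvFold0 (pred : Int → Bool) (l : List Int) :
    l.foldl (fun p w => if pred w then (if p = 0 then 1 else p + p) else p) 0
      = pvSc (l.countP pred) := by
  have h := pvFold pred l 0
  rw [show pvSc 0 = 0 from rfl] at h
  simpa using h

-- A's guarded calc_points equals the doubling score at the overlap's size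
theorem pv_calc_eq (s : PySem.Set Int) :
    (if PySem.Set.len s > 0 then pvCalcPoints s else 0) = pvSc s.length := by
  unfold pvCalcPoints PySem.Set.len pvSc
  rcases hn : s.length with _ | m
  · simp
  · rcases Nat.eq_zero_or_pos m with hm | hm
    · subst hm; norm_num
    · rw [if_pos (by push_cast; omega), if_neg (by push_cast; omega),
        if_pos (by push_cast; omega), if_neg (by omega)]
      congr 1
      omega

theorem compare_nums_spec : Claim_equal_compare_nums := by
  intro nums _ hpre
  unfold Pre_compare_nums at hpre
  unfold Spec_compare_nums compare_nums compare_nums_alt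
  generalize hG : (PySem.Str.split? nums "|").getD [] = parts at hpre ⊢
  obtain ⟨hlen, hl, hr⟩ := hpre
  rcases parts with _ | ⟨a, t⟩
  · simp at hlen
  rcases t with _ | ⟨b, rest⟩
  · simp at hlen
  have hnn : (0 : Int) ≤ (rest.length : Int) + 1 := by positivity
  have h0 : PySem.List.pyGet? (a :: b :: rest) (0 : Int) = some a := by
    simp [PySem.List.pyGet?, PySem.List.pyIdx?, hnn]
  have h1 : PySem.List.pyGet? (a :: b :: rest) (1 : Int) = some b := by
    simp [PySem.List.pyGet?, PySem.List.pyIdx?]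
  rw [h0] at hl
  rw [h1] at hr
  simp only [Option.getD_some] at hl hr
  obtain ⟨ls, hls⟩ := pv_parse_isSome _ hl
  obtain ⟨rs, hrs⟩ := pv_parse_isSome _ hr
  simp only [h0, h1, pv_str_split₀_strip, hls, hrs]
  rw [pv_calc_eq]
  rw [PySem.List.dedup_eq_ofList]
  rw [pvFold0]
  congr 1
  unfold PySem.Set.inter
  rw [← List.countP_eq_length_filter]
  exact List.countP_congr (fun x _ => by rw [pv_contains_ofList])
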